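-- pv_equiv track=rewrite | github.com/Alburrito/advent-of-code | years/2015/Day15/part2.py | calculate_combinations_score
-- ===== SOURCE A (Python) =====
-- from typing import Dict, List, Sequence, Tuple
--
-- def calculate_property_score(
--         property: str, combination: Tuple[int, ...], ingredients: Dict[str, Dict[str, int]]
-- ) -> int:
--     """
--     Calculates the total score for a specific property based on a combination of teaspoons.
--
--     Args:
--         property (str): The property to calculate the score for (e.g., 'capacity', 'durability').
--         combination (Tuple[int]): A tuple representing the number of teaspoons assigned to each ingredient.
--         ingredients (Dict[str, Dict[str, int]]): A dictionary of ingredients and their properties.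
--
--     Returns:
--         int: The total score for the specified property.
--
--     Raises:
--         ValueError:
--             - If the calculated score is less than or equal to 0.
--     """
--     score = sum([
--         ingredients[ingredient][property] * n_teaspoons
--         for ingredient, n_teaspoons in zip(ingredients, combination)
--     ])
--     if score <= 0:
--         raise ValueError('Negative or 0 score')
--     return score
--
-- def calculate_combinations_score(
--         combinations: Sequence[Tuple[int, ...]],
--         ingredients: Dict[str, Dict[str, int]]
-- ) -> Dict[Tuple[int], int]:
--     """
--     Calculates the total score for each combination of teaspoons based on ingredient properties.
--
--     Args:
--         combinations (List[Tuple[int]]): A list of combinations of teaspoons for the ingredients.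
--         ingredients (Dict[str, Dict[str, int]]): A dictionary of ingredients and their properties.
--
--     Returns:
--         Dict[Tuple[int], int]: A dictionary where the keys are combinations of teaspoons,
--                                and the values are the total scores for those combinations.
--     """
--     combinations_score = {}
--     for combination in combinations:
--         try:
--             calories = calculate_property_score('calories', combination, ingredients)
--             if calories != 500:
--                 raise ValueError('Calories are not 500')
--             capacity = calculate_property_score('capacity', combination, ingredients)
--             durability = calculate_property_score('durability', combination, ingredients)
--             flavor = calculate_property_score('flavor', combination, ingredients)
--             texture = calculate_property_score('texture', combination, ingredients)
--             score = capacity * durability * flavor * texture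
--         except ValueError:
--             score = 0
--         finally:
--             combinations_score[combination] = score
--             continue
--
--     return combinations_score
-- ===== SOURCE B (Python) =====
-- def calculate_combinations_score(combinations, ingredients):
--     rows = list(ingredients.values())
--
--     def property_totals(comb):
--         # one pass over the ingredients, accumulating all five property sums at once
--         cal = cap = dur = fla = tex = 0
--         for row, n in zip(rows, comb):
--             cal += row['calories'] * n
--             cap += row['capacity'] * n
--             dur += row['durability'] * n
--             fla += row['flavor'] * n
--             tex += row['texture'] * n
--         return cal, cap, dur, fla, tex
--
--     def score(comb):
--         cal, cap, dur, fla, tex = property_totals(comb)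
--         if cal == 500 and cap > 0 and dur > 0 and fla > 0 and tex > 0:
--             return cap * dur * fla * tex
--         return 0
--
--     return {comb: score(comb) for comb in combinations}
-- ===== Notes on version B (the rewrite author's own statement) =====
-- stated objective: simpler
-- what changed: Replaces A's five staged per-property passes (each via an exception-raising helper inside try/except/finally) with ONE pass over the ingredients per combination that accumulates all five property totals simultaneously in a tuple, scores from that tuple with a single conjunction test, and builds the result as a dict comprehension.
-- outside the precondition, e.g. on calculate_combinations_score([(1,)], {'a': {'calories': 1}}): A returns {(1,): 0}, B raises KeyError; on calculate_combinations_score([(1,)], {'a': {'calories': 500, 'capacity': 0}}): A returns {(1,): 0}, B raises KeyError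
import Mathlib
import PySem

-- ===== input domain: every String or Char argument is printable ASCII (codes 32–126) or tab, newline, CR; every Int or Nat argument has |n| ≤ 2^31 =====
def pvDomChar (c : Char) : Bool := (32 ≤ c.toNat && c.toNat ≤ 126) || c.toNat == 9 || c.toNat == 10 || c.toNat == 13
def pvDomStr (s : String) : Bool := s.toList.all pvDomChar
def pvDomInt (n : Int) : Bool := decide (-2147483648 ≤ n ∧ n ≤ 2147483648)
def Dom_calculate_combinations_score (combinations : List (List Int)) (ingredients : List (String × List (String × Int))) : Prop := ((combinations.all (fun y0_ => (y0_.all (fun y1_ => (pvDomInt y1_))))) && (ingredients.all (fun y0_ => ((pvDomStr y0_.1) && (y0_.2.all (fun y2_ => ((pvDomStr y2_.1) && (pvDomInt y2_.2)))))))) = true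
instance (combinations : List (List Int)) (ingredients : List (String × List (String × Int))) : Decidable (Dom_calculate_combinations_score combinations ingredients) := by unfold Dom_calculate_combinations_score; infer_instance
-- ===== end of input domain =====

-- B replaces A's five staged per-property passes (exception-raising helper, try/except/finally)
-- with one pass per combination accumulating all five property totals in a tuple (objective: simpler).

-- ===== PORT A =====
-- calculate_property_score: the sum over zip(ingredients, combination); `none` = the explicit
-- `raise ValueError` on a nonpositive sum.  `ingredients[ingredient][property]` is ported as
-- x.1.2 looked up by `property` with default 0: exact under Pre_ (unique outer keys, and every
-- property key present — a missing key would be a KeyError in Python, excluded by Pre_).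
def pvPropScoreA (property : String) (combination : List Int) (ingredients : List (String × List (String × Int))) : Option Int :=
  let score := ((ingredients.zip combination).map
      (fun x => (PySem.Dict.mk x.1.2).getD property 0 * x.2)).sum
  if score ≤ 0 then none else some score

def calculate_combinations_score (combinations : List (List Int)) (ingredients : List (String × List (String × Int))) : List (List Int × Int) :=
  (combinations.foldl (fun acc comb =>
      let score :=
        match pvPropScoreA "calories" comb ingredients with
        | none => 0          -- ValueError caught: score = 0
        | some calories =>
          if calories ≠ 500 then 0 else   -- raise ValueError('Calories are not 500'), caught
          match pvPropScoreA "capacity" comb ingredients with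
          | none => 0
          | some capacity =>
            match pvPropScoreA "durability" comb ingredients with
            | none => 0
            | some durability =>
              match pvPropScoreA "flavor" comb ingredients with
              | none => 0
              | some flavor =>
                match pvPropScoreA "texture" comb ingredients with
                | none => 0
                | some texture => capacity * durability * flavor * texture
      PySem.Dict.insert acc comb score)
    PySem.Dict.empty).items

-- ===== PORT B =====
-- property_totals: ONE fold over zip(rows, comb) accumulating the five sums as a tuple;
-- row[prop] ported as getD prop 0, exact under Pre_ (every property key present).
def pvTotalsB (rows : List (List (String × Int))) (comb : List Int) : Int × Int × Int × Int × Int :=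
  (rows.zip comb).foldl (fun s x =>
      let row := PySem.Dict.mk x.1
      (s.1 + row.getD "calories" 0 * x.2,
       s.2.1 + row.getD "capacity" 0 * x.2,
       s.2.2.1 + row.getD "durability" 0 * x.2,
       s.2.2.2.1 + row.getD "flavor" 0 * x.2,
       s.2.2.2.2 + row.getD "texture" 0 * x.2))
    (0, 0, 0, 0, 0)

def pvScoreB (rows : List (List (String × Int))) (comb : List Int) : Int :=
  let t := pvTotalsB rows comb
  if t.1 = 500 ∧ t.2.1 > 0 ∧ t.2.2.1 > 0 ∧ t.2.2.2.1 > 0 ∧ t.2.2.2.2 > 0 then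
    t.2.1 * t.2.2.1 * t.2.2.2.1 * t.2.2.2.2
  else 0

def calculate_combinations_score_alt (combinations : List (List Int)) (ingredients : List (String × List (String × Int))) : List (List Int × Int) :=
  let rows := ingredients.map Prod.snd          -- list(ingredients.values())
  -- dict comprehension {comb: score(comb) for comb in combinations}
  (combinations.foldl (fun d comb => PySem.Dict.insert d comb (pvScoreB rows comb)) PySem.Dict.empty).items

-- ===== PRECONDITION & SPEC =====
-- Pre_ excludes: association lists with duplicate outer or inner keys (not representable as a
-- Python dict, whose keys are unique), and inputs where an ingredient paired by zip with some
-- combination entry lacks one of the five property keys — there B raises KeyError while A may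
-- return 0 only because an earlier check short-circuits before the missing lookup.
def Pre_calculate_combinations_score (combinations : List (List Int)) (ingredients : List (String × List (String × Int))) : Prop :=
  (ingredients.map Prod.fst).Nodup ∧
  (∀ p ∈ ingredients, (p.2.map Prod.fst).Nodup) ∧
  ∀ pi ∈ ingredients.zipIdx, (∃ comb ∈ combinations, pi.2 < comb.length) →
    ∀ prop ∈ ["calories", "capacity", "durability", "flavor", "texture"],
      prop ∈ pi.1.2.map Prod.fst

instance (combinations : List (List Int)) (ingredients : List (String × List (String × Int))) : Decidable (Pre_calculate_combinations_score combinations ingredients) := by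
  unfold Pre_calculate_combinations_score; infer_instance

def pvWitness_calculate_combinations_score : List (List Int) × (List (String × List (String × Int))) :=
  ([[2, 3]],
   [("a", [("calories", 100), ("capacity", 1), ("durability", 1), ("flavor", 1), ("texture", 1)]),
    ("b", [("calories", 100), ("capacity", 1), ("durability", 1), ("flavor", 1), ("texture", 1)])])

def Spec_calculate_combinations_score (combinations : List (List Int)) (ingredients : List (String × List (String × Int))) (out : List (List Int × Int)) : Prop := out = calculate_combinations_score_alt combinations ingredients
instance (combinations : List (List Int)) (ingredients : List (String × List (String × Int))) (out : List (List Int × Int)) : Decidable (Spec_calculate_combinations_score combinations ingredients out) := by unfold Spec_calculate_combinations_score; infer_instance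

-- ===== CLAIM (what is proved, stated in full; the proofs are below) =====
def Claim_equal_calculate_combinations_score : Prop := ∀ (combinations : List (List Int)) (ingredients : List (String × List (String × Int))), Dom_calculate_combinations_score combinations ingredients → Pre_calculate_combinations_score combinations ingredients → Spec_calculate_combinations_score combinations ingredients (calculate_combinations_score combinations ingredients)

-- ===== LEMMAS AND PROOFS =====

-- A's per-property sum over zip(ingredients, comb), written directly.
def pvSumA (property : String) (comb : List Int) (ingredients : List (String × List (String × Int))) : Int :=
  ((ingredients.zip comb).map (fun x => (PySem.Dict.mk x.1.2).getD property 0 * x.2)).sum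

-- B's single-pass tuple accumulator computes exactly the five per-property sums.
lemma totals_eq (comb : List Int) (ingredients : List (String × List (String × Int))) :
    pvTotalsB (ingredients.map Prod.snd) comb
      = (pvSumA "calories" comb ingredients,
         pvSumA "capacity" comb ingredients,
         pvSumA "durability" comb ingredients,
         pvSumA "flavor" comb ingredients,
         pvSumA "texture" comb ingredients) := by
  unfold pvTotalsB pvSumA
  suffices h : ∀ (l : List ((String × List (String × Int)) × Int)) (a b c d e : Int),
      (l.map (fun x => (x.1.2, x.2))).foldl (fun s x =>
        let row := PySem.Dict.mk x.1
        (s.1 + row.getD "calories" 0 * x.2,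
         s.2.1 + row.getD "capacity" 0 * x.2,
         s.2.2.1 + row.getD "durability" 0 * x.2,
         s.2.2.2.1 + row.getD "flavor" 0 * x.2,
         s.2.2.2.2 + row.getD "texture" 0 * x.2)) (a, b, c, d, e)
      = (a + (l.map (fun x => (PySem.Dict.mk x.1.2).getD "calories" 0 * x.2)).sum,
         b + (l.map (fun x => (PySem.Dict.mk x.1.2).getD "capacity" 0 * x.2)).sum,
         c + (l.map (fun x => (PySem.Dict.mk x.1.2).getD "durability" 0 * x.2)).sum,
         d + (l.map (fun x => (PySem.Dict.mk x.1.2).getD "flavor" 0 * x.2)).sum,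
         e + (l.map (fun x => (PySem.Dict.mk x.1.2).getD "texture" 0 * x.2)).sum) by
    have hz : (ingredients.map Prod.snd).zip comb
        = (ingredients.zip comb).map (fun x => (x.1.2, x.2)) := by
      induction ingredients generalizing comb with
      | nil => simp
      | cons h t ih => cases comb with
        | nil => simp
        | cons c cs => simpa using ih cs
    rw [hz, h]
    simp
  intro l
  induction l with
  | nil => simp
  | cons x xs ih =>
    intro a b c d e
    simp only [List.map_cons, List.foldl_cons, List.sum_cons, ih]
    refine Prod.ext (by ring) (Prod.ext (by ring) (Prod.ext (by ring) (Prod.ext (by ring) (by ring))))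

-- Per-combination, A's try/except score equals B's tuple-based score.
lemma score_eq (comb : List Int) (ingredients : List (String × List (String × Int))) :
    (match pvPropScoreA "calories" comb ingredients with
     | none => 0
     | some calories =>
       if calories ≠ 500 then 0 else
       match pvPropScoreA "capacity" comb ingredients with
       | none => 0
       | some capacity =>
         match pvPropScoreA "durability" comb ingredients with
         | none => 0
         | some durability =>
           match pvPropScoreA "flavor" comb ingredients with
           | none => 0
           | some flavor =>
             match pvPropScoreA "texture" comb ingredients with
             | none => 0
             | some texture => capacity * durability * flavor * texture)
    = pvScoreB (ingredients.map Prod.snd) comb := by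
  unfold pvScoreB
  rw [totals_eq]
  simp only [pvPropScoreA, pvSumA]
  set sc := ((ingredients.zip comb).map (fun x => (PySem.Dict.mk x.1.2).getD "calories" 0 * x.2)).sum with hsc
  set sp := ((ingredients.zip comb).map (fun x => (PySem.Dict.mk x.1.2).getD "capacity" 0 * x.2)).sum with hsp
  set sd := ((ingredients.zip comb).map (fun x => (PySem.Dict.mk x.1.2).getD "durability" 0 * x.2)).sum with hsd
  set sf := ((ingredients.zip comb).map (fun x => (PySem.Dict.mk x.1.2).getD "flavor" 0 * x.2)).sum with hsf
  set st := ((ingredients.zip comb).map (fun x => (PySem.Dict.mk x.1.2).getD "texture" 0 * x.2)).sum with hst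
  clear_value sc sp sd sf st
  by_cases hc : sc ≤ 0
  · simp [hc]; intro h; omega
  · simp only [if_neg hc]
    by_cases h500 : sc = 500
    · simp only [h500, ne_eq, not_true_eq_false, if_false]
      by_cases hp : sp ≤ 0
      · simp [hp]
      · simp only [if_neg hp]
        by_cases hd : sd ≤ 0
        · simp [hd]
        · simp only [if_neg hd]
          by_cases hf : sf ≤ 0
          · simp [hf]
          · simp only [if_neg hf]
            by_cases ht : st ≤ 0
            · simp [ht]
            · simp only [if_neg ht]
              rw [if_pos ⟨trivial, by omega, by omega, by omega, by omega⟩]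
    · simp [h500]

lemma fold_eq (combinations : List (List Int)) (ingredients : List (String × List (String × Int)))
    (acc : PySem.Dict (List Int) Int) :
    combinations.foldl (fun acc comb =>
      let score :=
        match pvPropScoreA "calories" comb ingredients with
        | none => 0
        | some calories =>
          if calories ≠ 500 then 0 else
          match pvPropScoreA "capacity" comb ingredients with
          | none => 0
          | some capacity =>
            match pvPropScoreA "durability" comb ingredients with
            | none => 0
            | some durability =>
              match pvPropScoreA "flavor" comb ingredients with
              | none => 0
              | some flavor =>
                match pvPropScoreA "texture" comb ingredients with
                | none => 0
                | some texture => capacity * durability * flavor * texture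
      PySem.Dict.insert acc comb score) acc
    = combinations.foldl (fun d comb =>
        PySem.Dict.insert d comb (pvScoreB (ingredients.map Prod.snd) comb)) acc := by
  induction combinations generalizing acc with
  | nil => rfl
  | cons comb rest ih =>
    simp only [List.foldl_cons]
    rw [score_eq comb ingredients]
    exact ih _

-- ===== VERDICT (by name: the statement is the Claim_ definition above) =====
theorem calculate_combinations_score_spec : Claim_equal_calculate_combinations_score := by
  intro combinations ingredients _ _
  unfold Spec_calculate_combinations_score calculate_combinations_score calculate_combinations_score_alt
  rw [fold_eq]
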